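-- pv_equiv track=rewrite | github.com/farhan03-5/Passward--checker | passward_checker.py | repeated_chars_penalty
-- ===== SOURCE A (Python) =====
-- def repeated_chars_penalty(password):
--                     # detect long runs of same char
--     max_run = 1
--     curr = 1
--     for i in range(1,len(password)):
--         if password[i] == password[i-1]:
--             curr += 1
--             max_run = max(max_run, curr)
--         else:
--             curr = 1
--     if max_run >= 4:
--         return min(10, (max_run - 3)*3)  # up to 10 points penalty
--     return 0
-- ===== SOURCE B (Python) =====
-- def repeated_chars_penalty(password):
--     # run-length decompose the password, then reduce over the run lengths
--     runs = []
--     rest = password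
--     while rest:
--         c = rest[0]
--         k = 1
--         while k < len(rest) and rest[k] == c:
--             k += 1
--         runs.append(k)
--         rest = rest[k:]
--     max_run = max(runs, default=1)
--     if max_run >= 4:
--         return min(10, (max_run - 3) * 3)
--     return 0
-- ===== Notes on version B (the rewrite author's own statement) =====
-- stated objective: alternative
-- what changed: B run-length-decomposes the password into a list of run lengths and then reduces with max(runs, default=1), instead of A's single pairwise index scan maintaining curr/max_run.
import Mathlib
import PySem

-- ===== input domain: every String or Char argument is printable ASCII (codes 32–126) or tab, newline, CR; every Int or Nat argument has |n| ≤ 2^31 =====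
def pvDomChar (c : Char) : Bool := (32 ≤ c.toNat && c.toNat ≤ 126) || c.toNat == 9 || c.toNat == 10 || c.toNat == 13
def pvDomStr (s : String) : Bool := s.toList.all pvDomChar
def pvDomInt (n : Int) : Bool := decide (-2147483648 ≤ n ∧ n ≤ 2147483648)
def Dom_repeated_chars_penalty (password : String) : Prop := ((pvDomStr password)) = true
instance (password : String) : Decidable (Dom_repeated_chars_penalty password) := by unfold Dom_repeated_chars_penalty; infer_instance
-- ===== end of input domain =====

-- B run-length-decomposes the password and reduces with max(runs, default=1) instead of A's pairwise curr/max_run scan (alternative decomposition, same cost).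


-- ===== PORT A =====
-- literal port of A: fold over range(1, len(password)) carrying (max_run, curr);
-- string indexing is done on password.toList (indices 1 ≤ i < len are always in range, so pyGetD is exact)
def repeated_chars_penalty (password : String) : Int :=
  let l := password.toList
  let st := (PySem.List.pyRange 1 (PySem.List.len l)).foldl
    (fun (p : Int × Int) i =>
      if PySem.List.pyGetD l i ' ' = PySem.List.pyGetD l (i - 1) ' ' then
        (max p.1 (p.2 + 1), p.2 + 1)
      else (p.1, 1)) (1, 1)
  if st.1 ≥ 4 then min 10 ((st.1 - 3) * 3) else 0

-- ===== PORT B =====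
-- B's inner `while k < len(rest) and rest[k] == c` loop: count the leading run of c, return the count and rest[k:]
def pvCountRun (c : Char) : List Char → Int × List Char
  | [] => (0, [])
  | x :: xs => if x = c then let p := pvCountRun c xs; (p.1 + 1, p.2) else (0, x :: xs)

theorem pvCountRun_snd_len_le (c : Char) (l : List Char) : (pvCountRun c l).2.length ≤ l.length := by
  induction l with
  | nil => simp [pvCountRun]
  | cons x xs ih =>
    by_cases h : x = c
    · simp [pvCountRun, h]; omega
    · simp [pvCountRun, h]

-- B's outer `while rest:` loop building the list of run lengths
def pvRunLens : List Char → List Int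
  | [] => []
  | c :: cs =>
    let p := pvCountRun c cs
    (p.1 + 1) :: pvRunLens p.2
termination_by l => l.length
decreasing_by
  have := pvCountRun_snd_len_le c cs
  simpa using Nat.lt_succ_of_le this

def repeated_chars_penalty_alt (password : String) : Int :=
  let runs := pvRunLens password.toList
  let max_run := PySem.List.maxD runs (fun r => r) 1
  if max_run ≥ 4 then min 10 ((max_run - 3) * 3) else 0

-- ===== PRECONDITION & SPEC =====
def Spec_repeated_chars_penalty (password : String) (out : Int) : Prop := out = repeated_chars_penalty_alt password
instance (password : String) (out : Int) : Decidable (Spec_repeated_chars_penalty password out) := by unfold Spec_repeated_chars_penalty; infer_instance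

-- ===== CLAIM (what is proved, stated in full; the proofs are below) =====
def Claim_equal_repeated_chars_penalty : Prop := ∀ (password : String), Dom_repeated_chars_penalty password → Spec_repeated_chars_penalty password (repeated_chars_penalty password)

-- ===== LEMMAS AND PROOFS =====

-- A's scan rewritten structurally: previous char, remaining chars, state (max_run, curr)
def pvPairScan (prev : Char) : List Char → Int × Int → Int × Int
  | [], st => st
  | x :: xs, (m, c) =>
    if x = prev then pvPairScan x xs (max m (c + 1), c + 1)
    else pvPairScan x xs (m, 1)

theorem pvCountRun_fst_nonneg (c : Char) (l : List Char) : 0 ≤ (pvCountRun c l).1 := by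
  induction l with
  | nil => simp [pvCountRun]
  | cons x xs ih =>
    by_cases h : x = c
    · simp [pvCountRun, h]; omega
    · simp [pvCountRun, h]

theorem pvCountRun_fst_zero (c : Char) (l : List Char) (h : (pvCountRun c l).1 = 0) :
    (pvCountRun c l).2 = l := by
  cases l with
  | nil => simp [pvCountRun]
  | cons x xs =>
    by_cases hx : x = c
    · exfalso
      have := pvCountRun_fst_nonneg c xs
      simp [pvCountRun, hx] at h
      omega
    · simp [pvCountRun, hx]

-- index-based fold over range(1, len) equals the structural pair scan
theorem pvScan_index_eq (cs : List Char) : ∀ (c : Char) (pre : List Char) (st : Int × Int),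
    (PySem.List.pyRange ((pre.length : Int) + 1) (PySem.List.len (pre ++ c :: cs))).foldl
      (fun (p : Int × Int) i =>
        if PySem.List.pyGetD (pre ++ c :: cs) i ' ' = PySem.List.pyGetD (pre ++ c :: cs) (i - 1) ' ' then
          (max p.1 (p.2 + 1), p.2 + 1)
        else (p.1, 1)) st
      = pvPairScan c cs st := by
  induction cs with
  | nil =>
    intro c pre st
    have h : PySem.List.pyRange ((pre.length : Int) + 1) (PySem.List.len (pre ++ [c])) = [] := by
      simp [PySem.List.len_eq, PySem.List.pyRange]
    rw [h]
    rfl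
  | cons x xs ih =>
    intro c pre st
    obtain ⟨m, cc⟩ := st
    have hlt : (pre.length : Int) + 1 < PySem.List.len (pre ++ c :: x :: xs) := by
      simp [PySem.List.len_eq]
    rw [PySem.List.pyRange_one_cons hlt]
    have hcast : (pre.length : Int) + 1 = ((pre.length + 1 : Nat) : Int) := by push_cast; ring
    have hx1 : PySem.List.pyGetD (pre ++ c :: x :: xs) ((pre.length : Int) + 1) ' ' = x := by
      rw [hcast, PySem.List.pyGetD_natCast]
      simp [List.getD]
    have hx0 : PySem.List.pyGetD (pre ++ c :: x :: xs) ((pre.length : Int) + 1 - 1) ' ' = c := by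
      have : (pre.length : Int) + 1 - 1 = ((pre.length : Nat) : Int) := by ring
      rw [this, PySem.List.pyGetD_natCast]
      simp [List.getD]
    have hIH := ih x (pre ++ [c])
    simp only [List.append_assoc, List.cons_append, List.nil_append, List.length_append,
      List.length_cons, List.length_nil] at hIH
    have hstart : ((pre.length + 1 : Nat) : Int) + 1 = (pre.length : Int) + 1 + 1 := by push_cast; ring
    rw [hstart] at hIH
    simp only [List.foldl_cons, hx1, hx0]
    by_cases hxc : x = c
    · simp only [pvPairScan, if_pos hxc]
      exact hIH (max m (cc + 1), cc + 1)
    · simp only [pvPairScan, if_neg hxc]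
      exact hIH (m, 1)

-- the index scan started at 1 on a nonempty list (A's actual loop)
theorem pvScan_index_eq0 (c : Char) (cs : List Char) (st : Int × Int) :
    (PySem.List.pyRange 1 (PySem.List.len (c :: cs))).foldl
      (fun (p : Int × Int) i =>
        if PySem.List.pyGetD (c :: cs) i ' ' = PySem.List.pyGetD (c :: cs) (i - 1) ' ' then
          (max p.1 (p.2 + 1), p.2 + 1)
        else (p.1, 1)) st
      = pvPairScan c cs st := by
  simpa using pvScan_index_eq cs c [] st

-- the pair scan's max_run, through the run-length decomposition
theorem pvPairScan_fst (xs : List Char) : ∀ (prev : Char) (m c : Int), 1 ≤ m →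
    (pvPairScan prev xs (m, c)).1 =
      (pvRunLens (pvCountRun prev xs).2).foldl (fun a r => max a r)
        (if (pvCountRun prev xs).1 = 0 then m else max m (c + (pvCountRun prev xs).1)) := by
  induction xs with
  | nil => intro prev m c hm; simp [pvPairScan, pvCountRun, pvRunLens]
  | cons x xs ih =>
    intro prev m c hm
    have hk := pvCountRun_fst_nonneg x xs
    by_cases hx : x = prev
    · subst hx
      simp only [pvPairScan, pvCountRun, if_true]
      rw [ih x (max m (c + 1)) (c + 1) (by omega)]
      have hne : ¬ ((pvCountRun x xs).1 + 1 = 0) := by omega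
      by_cases h0 : (pvCountRun x xs).1 = 0
      · rw [if_pos h0, if_neg hne, h0]
        congr 1
      · rw [if_neg h0, if_neg hne]
        congr 1
        omega
    · simp only [pvPairScan, pvCountRun, if_neg hx]
      rw [ih x m 1 hm]
      rw [if_pos trivial]
      rw [show pvRunLens (x :: xs) = ((pvCountRun x xs).1 + 1) :: pvRunLens (pvCountRun x xs).2 from by simp [pvRunLens]]
      rw [List.foldl_cons]
      by_cases h0 : (pvCountRun x xs).1 = 0
      · rw [if_pos h0, pvCountRun_fst_zero x xs h0, h0]
        congr 1
        omega
      · rw [if_neg h0]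
        congr 1
        omega

-- Python max(r :: rs, default=1) as a fold
theorem pvMax?_cons (rs : List Int) : ∀ (r : Int),
    PySem.List.max? (r :: rs) (fun x => x) = some (rs.foldl (fun a x => max a x) r) := by
  induction rs with
  | nil => intro r; simp [PySem.List.max?]
  | cons y ys ih =>
    intro r
    by_cases h : r < y
    · have e1 : PySem.List.max? (r :: y :: ys) (fun x : Int => x) = PySem.List.max? (y :: ys) (fun x => x) := by
        simp [PySem.List.max?, h]
      rw [e1, ih y, List.foldl_cons, max_eq_right h.le]
    · have e1 : PySem.List.max? (r :: y :: ys) (fun x : Int => x) = PySem.List.max? (r :: ys) (fun x => x) := by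
        simp [PySem.List.max?, h]
      rw [e1, ih r, List.foldl_cons, max_eq_left (not_lt.mp h)]

-- Python max(r :: rs, default=1) as a fold
theorem pvMaxD_foldl (r : Int) (rs : List Int) :
    PySem.List.maxD (r :: rs) (fun x => x) 1 = rs.foldl (fun a x => max a x) r := by
  simp only [PySem.List.maxD]
  rw [pvMax?_cons]
  rfl

-- ===== VERDICT (by name: the statement is the Claim_ definition above) =====
theorem repeated_chars_penalty_spec : Claim_equal_repeated_chars_penalty := by
  intro password _
  unfold Spec_repeated_chars_penalty
  cases hl : password.toList with
  | nil =>
    simp only [repeated_chars_penalty, repeated_chars_penalty_alt, hl]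
    simp [PySem.List.len_eq, PySem.List.pyRange, pvRunLens, PySem.List.maxD, PySem.List.max?]
  | cons c cs =>
    simp only [repeated_chars_penalty, repeated_chars_penalty_alt, hl]
    rw [pvScan_index_eq0]
    rw [pvPairScan_fst cs c 1 1 (le_refl 1)]
    rw [show pvRunLens (c :: cs) = ((pvCountRun c cs).1 + 1) :: pvRunLens (pvCountRun c cs).2 from by simp [pvRunLens]]
    rw [pvMaxD_foldl]
    have hk := pvCountRun_fst_nonneg c cs
    by_cases h0 : (pvCountRun c cs).1 = 0
    · rw [if_pos h0, h0]
      norm_num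
    · rw [if_neg h0]
      have hmx : max 1 (1 + (pvCountRun c cs).1) = (pvCountRun c cs).1 + 1 := by omega
      rw [hmx]
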